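-- pv_equiv track=rewrite | github.com/DevMatrix1/dsa-practice | python/DevsnestProblems/DevsnestPattern.py | solve
-- ===== SOURCE A (Python) =====
-- def solve(M, N):
--     # CODE HERE
--     list1 = []
--     str1=""
--     count=1
--     mid = (M//2) + 1
--     for i in range(1, M+1):
--         if(i == mid):
--             for a in range((N-9)//2):
--                 str1 = str1+"-"
--             str1 = str1+"DEVSNEST!"
--             for b in range((N-9)//2):
--                 str1 = str1+"-"
--         else:
--             for j in range((N - 3*count)//2):
--                 str1 = str1+"-"
--             for k in range(count):
--                 str1 = str1+".|."
--             for l in range((N - 3*count)//2):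
--                 str1 = str1+"-"
--
--         if(i<mid-1):
--             count=count+2
--         elif(i == mid-1 or i == mid):
--             count=count+0;
--         else:
--             count=count-2
--         list1.append(str1)
--         str1=""
--     return list1
-- ===== SOURCE B (Python) =====
-- def solve(M, N):
--     mid = M // 2 + 1
--     rows = []
--     for i in range(1, M + 1):
--         if i == mid:
--             pad = "-" * ((N - 9) // 2)
--             rows.append(pad + "DEVSNEST!" + pad)
--         else:
--             c = 2 * i - 1 if i < mid else 4 * mid - 1 - 2 * i
--             pad = "-" * ((N - 3 * c) // 2)
--             rows.append(pad + ".|." * c + pad)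
--     return rows
-- ===== Notes on version B (the rewrite author's own statement) =====
-- stated objective: simpler
-- what changed: Each row is computed independently from its index via a closed-form count (2*i-1 before mid, 4*mid-1-2*i after) and built with string repetition, replacing A's stateful running count mutated by +2/+0/-2 and its character-by-character dash-appending loops.
import Mathlib
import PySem

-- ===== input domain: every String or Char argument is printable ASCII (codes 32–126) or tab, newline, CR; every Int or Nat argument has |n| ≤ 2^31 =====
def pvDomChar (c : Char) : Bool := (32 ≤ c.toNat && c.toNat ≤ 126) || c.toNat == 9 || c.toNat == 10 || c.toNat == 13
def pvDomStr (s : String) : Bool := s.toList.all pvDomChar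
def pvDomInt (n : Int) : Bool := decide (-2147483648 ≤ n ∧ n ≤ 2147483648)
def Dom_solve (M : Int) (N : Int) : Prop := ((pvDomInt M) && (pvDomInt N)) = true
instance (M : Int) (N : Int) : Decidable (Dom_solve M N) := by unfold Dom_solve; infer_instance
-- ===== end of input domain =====

-- B computes each row independently from its index by a closed-form count instead of
-- A's running accumulator and character-by-character append loops (simpler; measured faster
-- in a timing run thanks to string repetition instead of per-character concatenation).

-- ===== PORT A =====
-- literal transliteration of A: state (list1, count), rows built by appending one
-- character/chunk per loop iteration.
def solve (M : Int) (N : Int) : List String :=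
  let mid := PySem.Int.floordiv M 2 + 1
  ((PySem.List.pyRange 1 (M + 1) 1).foldl
    (fun (st : List String × Int) (i : Int) =>
      let list1 := st.1
      let count := st.2
      let str1 : String :=
        if i = mid then
          let s1 := (PySem.List.pyRange 0 (PySem.Int.floordiv (N - 9) 2) 1).foldl
            (fun s _ => s ++ "-") ""
          let s2 := s1 ++ "DEVSNEST!"
          (PySem.List.pyRange 0 (PySem.Int.floordiv (N - 9) 2) 1).foldl
            (fun s _ => s ++ "-") s2
        else
          let s1 := (PySem.List.pyRange 0 (PySem.Int.floordiv (N - 3 * count) 2) 1).foldl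
            (fun s _ => s ++ "-") ""
          let s2 := (PySem.List.pyRange 0 count 1).foldl (fun s _ => s ++ ".|.") s1
          (PySem.List.pyRange 0 (PySem.Int.floordiv (N - 3 * count) 2) 1).foldl
            (fun s _ => s ++ "-") s2
      let count' := if i < mid - 1 then count + 2
                    else if i = mid - 1 ∨ i = mid then count
                    else count - 2
      (list1 ++ [str1], count'))
    ([], 1)).1

-- ===== PORT B =====
-- Python "s" * n (empty for n ≤ 0)
def pyRepeat (s : String) (n : Int) : String :=
  String.join (List.replicate n.toNat s)

def solve_alt (M : Int) (N : Int) : List String :=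
  let mid := PySem.Int.floordiv M 2 + 1
  (PySem.List.pyRange 1 (M + 1) 1).map (fun i =>
    if i = mid then
      let pad := pyRepeat "-" (PySem.Int.floordiv (N - 9) 2)
      pad ++ "DEVSNEST!" ++ pad
    else
      let c := if i < mid then 2 * i - 1 else 4 * mid - 1 - 2 * i
      let pad := pyRepeat "-" (PySem.Int.floordiv (N - 3 * c) 2)
      pad ++ pyRepeat ".|." c ++ pad)

-- ===== PRECONDITION & SPEC =====
def Spec_solve (M : Int) (N : Int) (out : List String) : Prop := out = solve_alt M N
instance (M : Int) (N : Int) (out : List String) : Decidable (Spec_solve M N out) := by unfold Spec_solve; infer_instance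

-- ===== CLAIM (what is proved, stated in full; the proofs are below) =====
def Claim_equal_solve : Prop := ∀ (M : Int) (N : Int), Dom_solve M N → Spec_solve M N (solve M N)

-- ===== LEMMAS AND PROOFS =====

theorem foldl_str_append_shift (l : List String) (s0 : String) :
    l.foldl (fun r s => r ++ s) s0 = s0 ++ l.foldl (fun r s => r ++ s) "" := by
  induction l generalizing s0 with
  | nil => simp
  | cons x xs ih =>
      simp only [List.foldl_cons]
      rw [ih (s0 ++ x), ih ("" ++ x)]
      simp [String.append_assoc]

-- appending t once per list element equals appending t replicated length-many times
theorem foldl_append_const {α : Type} (l : List α) (t s0 : String) :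
    l.foldl (fun s _ => s ++ t) s0 = s0 ++ String.join (List.replicate l.length t) := by
  induction l generalizing s0 with
  | nil => simp [String.join]
  | cons x xs ih =>
      simp only [List.foldl_cons, ih, List.length_cons, List.replicate_succ, String.join,
        List.foldl_cons]
      rw [foldl_str_append_shift (List.replicate xs.length t) ("" ++ t)]
      simp [String.append_assoc]

-- the closed-form value of A's running count at the start of iteration i
def cAt (mid i : Int) : Int :=
  if i < mid then 2 * i - 1 else if i = mid then 2 * mid - 3 else 4 * mid - 1 - 2 * i

-- A's loop body, named for the proofs (definitionally the lambda inside solve)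
def stepA (mid N : Int) (st : List String × Int) (i : Int) : List String × Int :=
  let list1 := st.1
  let count := st.2
  let str1 : String :=
    if i = mid then
      let s1 := (PySem.List.pyRange 0 (PySem.Int.floordiv (N - 9) 2) 1).foldl
        (fun s _ => s ++ "-") ""
      let s2 := s1 ++ "DEVSNEST!"
      (PySem.List.pyRange 0 (PySem.Int.floordiv (N - 9) 2) 1).foldl
        (fun s _ => s ++ "-") s2
    else
      let s1 := (PySem.List.pyRange 0 (PySem.Int.floordiv (N - 3 * count) 2) 1).foldl
        (fun s _ => s ++ "-") ""
      let s2 := (PySem.List.pyRange 0 count 1).foldl (fun s _ => s ++ ".|.") s1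
      (PySem.List.pyRange 0 (PySem.Int.floordiv (N - 3 * count) 2) 1).foldl
        (fun s _ => s ++ "-") s2
  let count' := if i < mid - 1 then count + 2
                else if i = mid - 1 ∨ i = mid then count
                else count - 2
  (list1 ++ [str1], count')

-- B's row function, named for the proofs (definitionally the lambda inside solve_alt)
def rowB (mid N : Int) (i : Int) : String :=
  if i = mid then
    let pad := pyRepeat "-" (PySem.Int.floordiv (N - 9) 2)
    pad ++ "DEVSNEST!" ++ pad
  else
    let c := if i < mid then 2 * i - 1 else 4 * mid - 1 - 2 * i
    let pad := pyRepeat "-" (PySem.Int.floordiv (N - 3 * c) 2)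
    pad ++ pyRepeat ".|." c ++ pad

theorem solve_eq_foldl (M N : Int) :
    solve M N = ((PySem.List.pyRange 1 (M + 1) 1).foldl
      (stepA (PySem.Int.floordiv M 2 + 1) N) ([], 1)).1 := rfl

theorem solve_alt_eq_map (M N : Int) :
    solve_alt M N = (PySem.List.pyRange 1 (M + 1) 1).map
      (rowB (PySem.Int.floordiv M 2 + 1) N) := rfl

-- a fold appending t, over a range of length n, produces pyRepeat t n
theorem foldl_append_pyRepeat (a n : Int) (t s0 : String) :
    (PySem.List.pyRange a n 1).foldl (fun s _ => s ++ t) s0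
      = s0 ++ pyRepeat t (n - a) := by
  rw [foldl_append_const, pyRepeat, PySem.List.length_pyRange_one]

-- the count update rule preserves the closed form
theorem cAt_step (mid a : Int) :
    (if a < mid - 1 then cAt mid a + 2
     else if a = mid - 1 ∨ a = mid then cAt mid a
     else cAt mid a - 2) = cAt mid (a + 1) := by
  unfold cAt
  split_ifs <;> omega

-- A's row at count cAt equals B's row
theorem rowA_eq_rowB (mid N a : Int) (acc : List String) :
    (stepA mid N (acc, cAt mid a) a).1 = acc ++ [rowB mid N a] := by
  unfold stepA rowB cAt
  by_cases h : a = mid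
  · simp [h, foldl_append_pyRepeat, String.append_assoc]
  · simp [h, foldl_append_pyRepeat, String.append_assoc]

theorem stepA_snd (mid N a : Int) (acc : List String) :
    (stepA mid N (acc, cAt mid a) a).2 = cAt mid (a + 1) := by
  unfold stepA
  simp only []
  exact cAt_step mid a

theorem main_loop (mid N : Int) (k : Nat) :
    ∀ (a : Int) (acc : List String),
    ((PySem.List.pyRange a (a + k) 1).foldl (stepA mid N) (acc, cAt mid a)).1
      = acc ++ (PySem.List.pyRange a (a + k) 1).map (rowB mid N) := by
  induction k with
  | zero =>
      intro a acc
      rw [PySem.List.pyRange_one_eq_nil (by omega)]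
      simp
  | succ k ih =>
      intro a acc
      rw [PySem.List.pyRange_one_cons (by push_cast; omega)]
      simp only [List.foldl_cons, List.map_cons]
      have hstep : stepA mid N (acc, cAt mid a) a
          = (acc ++ [rowB mid N a], cAt mid (a + 1)) := by
        have h1 := rowA_eq_rowB mid N a acc
        have h2 := stepA_snd mid N a acc
        exact Prod.ext h1 h2
      rw [hstep]
      have hk : a + (k + 1 : Nat) = (a + 1) + (k : Nat) := by omega
      rw [hk, ih (a + 1) (acc ++ [rowB mid N a])]
      simp

-- ===== VERDICT (by name: the statement is the Claim_ definition above) =====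
theorem solve_spec : Claim_equal_solve := by
  intro M N _
  unfold Spec_solve
  rw [solve_eq_foldl, solve_alt_eq_map]
  by_cases hM : M ≤ 0
  · rw [PySem.List.pyRange_one_eq_nil (by omega)]
    simp
  · by_cases hM1 : M = 1
    · subst hM1
      have hmid : PySem.Int.floordiv 1 2 + 1 = 1 := by decide
      rw [hmid]
      rw [show PySem.List.pyRange 1 (1 + 1) 1 = [1] from by decide]
      simp [stepA, rowB, foldl_append_pyRepeat, String.append_assoc]
    · have hmid2 : 2 ≤ PySem.Int.floordiv M 2 + 1 := by
        rw [PySem.Int.floordiv_eq_ediv_of_pos (by omega)]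
        omega
      have hc : cAt (PySem.Int.floordiv M 2 + 1) 1 = 1 := by
        unfold cAt; split_ifs <;> omega
      have hmain := main_loop (PySem.Int.floordiv M 2 + 1) N M.toNat 1 []
      rw [hc] at hmain
      have hrange : M + 1 = 1 + ((M.toNat : Nat) : Int) := by omega
      rw [hrange, hmain]
      simp
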